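-- pv_equiv track=rewrite | github.com/Tragica1/WebProject | utils.py | fix_quotes
-- ===== SOURCE A (Python) =====
-- def fix_quotes(string):
--     counter = 1
--     new_string = ""
--     for i in range(len(string)):
--         if string[i] == '"':
--             if counter % 2 != 0:
--                 counter+=1
--                 new_string += "«"
--             else:
--                 counter-=1
--                 new_string += "»"
--         else:
--             new_string += string[i]
--     return new_string
-- ===== SOURCE B (Python) =====
-- def fix_quotes(string):
--     parts = string.split('"')
--     out = [parts[0]]
--     for part, i in zip(parts[1:], range(1, len(parts))):
--         out.append('\u00ab' if i % 2 == 1 else '\u00bb')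
--         out.append(part)
--     return ''.join(out)
-- ===== Notes on version B (the rewrite author's own statement) =====
-- stated objective: faster
-- what changed: B splits the string once at the quote character and joins the segments back with guillemets alternating by segment index, instead of scanning character by character while growing the result by repeated string concatenation.
import Mathlib
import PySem

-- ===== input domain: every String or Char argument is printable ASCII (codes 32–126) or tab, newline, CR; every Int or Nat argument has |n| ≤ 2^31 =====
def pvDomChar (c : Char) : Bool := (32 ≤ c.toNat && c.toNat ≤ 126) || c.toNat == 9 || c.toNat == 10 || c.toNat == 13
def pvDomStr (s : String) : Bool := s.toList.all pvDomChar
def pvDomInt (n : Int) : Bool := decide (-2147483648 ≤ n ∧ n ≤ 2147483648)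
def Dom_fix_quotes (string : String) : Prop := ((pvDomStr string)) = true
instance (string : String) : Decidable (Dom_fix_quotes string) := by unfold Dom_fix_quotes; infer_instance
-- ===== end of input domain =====

-- ===== PORT A =====
-- Header: B replaces A's per-character counter scan by split-on-'"' and an alternating-separator join (same return value; no side effects).
-- A's loop: state (counter, new_string), one step per character of the string.
def fix_quotes (string : String) : String :=
  let r := string.toList.foldl (fun (st : Int × List Char) c =>
    if c = '"' then
      if PySem.Int.mod st.1 2 ≠ 0 then (st.1 + 1, st.2 ++ ['«'])
      else (st.1 - 1, st.2 ++ ['»'])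
    else (st.1, st.2 ++ [c])) (1, [])
  String.ofList r.2

-- ===== PORT B =====
-- Source B: parts = string.split('"'); then one pass over parts[1:] with index i from 1, appending '«'/'»' by parity of i, then the part.
def fix_quotes_alt (string : String) : String :=
  let parts := string.toList.splitOn '"'
  let rest := parts.tail
  String.ofList ((rest.zipIdx 1).foldl
    (fun acc pi => acc ++ (if pi.2 % 2 == 1 then ['«'] else ['»']) ++ pi.1)
    (parts.headD []))

-- ===== PRECONDITION & SPEC =====
def Spec_fix_quotes (string : String) (out : String) : Prop := out = fix_quotes_alt string
instance (string : String) (out : String) : Decidable (Spec_fix_quotes string out) := by unfold Spec_fix_quotes; infer_instance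

-- ===== CLAIM (what is proved, stated in full; the proofs are below) =====
def Claim_equal_fix_quotes : Prop := ∀ (string : String), Dom_fix_quotes string → Spec_fix_quotes string (fix_quotes string)

-- ===== LEMMAS AND PROOFS =====

-- recursive reading of A's loop (output part only)
def pvArec : List Char → Int → List Char
  | [], _ => []
  | c :: t, k =>
    if c = '"' then
      if PySem.Int.mod k 2 ≠ 0 then '«' :: pvArec t (k + 1) else '»' :: pvArec t (k - 1)
    else c :: pvArec t k

-- recursive reading of B's join: alternating separators, b = "next separator is «"
def pvAlt : Bool → List (List Char) → List Char
  | _, [] => []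
  | b, p :: ps => (if b then '«' else '»') :: (p ++ pvAlt (!b) ps)

lemma pvFoldA (cs : List Char) : ∀ (k : Int) (acc : List Char),
    (cs.foldl (fun (st : Int × List Char) c =>
      if c = '"' then
        if PySem.Int.mod st.1 2 ≠ 0 then (st.1 + 1, st.2 ++ ['«'])
        else (st.1 - 1, st.2 ++ ['»'])
      else (st.1, st.2 ++ [c])) (k, acc)).2 = acc ++ pvArec cs k := by
  induction cs with
  | nil => intro k acc; simp [pvArec]
  | cons c t ih =>
    intro k acc
    rw [List.foldl_cons]
    unfold pvArec
    split_ifs with hc hm <;> rw [ih] <;> simp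

lemma pvFoldB (ps : List (List Char)) : ∀ (i : Nat) (acc : List Char),
    ((ps.zipIdx i).foldl
      (fun acc pi => acc ++ (if pi.2 % 2 == 1 then ['«'] else ['»']) ++ pi.1) acc)
    = acc ++ pvAlt (i % 2 == 1) ps := by
  induction ps with
  | nil => intro i acc; simp [pvAlt]
  | cons p t ih =>
    intro i acc
    rw [List.zipIdx_cons, List.foldl_cons, ih (i + 1)]
    rcases Nat.mod_two_eq_zero_or_one i with h | h <;>
      simp [pvAlt, h, Nat.add_mod, List.append_assoc]

lemma pvSplitOn_ne_nil (cs : List Char) : cs.splitOn '"' ≠ [] := by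
  simp [List.splitOn]
  induction cs with
  | nil => simp [List.splitOnP_nil]
  | cons c t ih =>
    rw [List.splitOnP_cons]
    by_cases hc : (c == '"') = true
    · simp [hc]
    · simp only [hc]
      rcases h : List.splitOnP (fun a => a == '"') t with _ | ⟨p, ps⟩
      · exact absurd h ih
      · simp [List.modifyHead]

lemma pvMain (cs : List Char) : ∀ (b : Bool),
    pvArec cs (if b then 1 else 2)
      = (cs.splitOn '"').headD [] ++ pvAlt b (cs.splitOn '"').tail := by
  induction cs with
  | nil => intro b; simp [pvArec, List.splitOn, List.splitOnP_nil, pvAlt]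
  | cons c t ih =>
    intro b
    rcases h : t.splitOn '"' with _ | ⟨p, ps⟩
    · exact absurd h (pvSplitOn_ne_nil t)
    by_cases hc : c = '"'
    · have hsp : (c :: t).splitOn '"' = [] :: t.splitOn '"' := by
        simp [List.splitOn, List.splitOnP_cons, hc]
      rw [hsp, h]
      have hrec : pvArec (c :: t) (if b then 1 else 2)
          = (if b then '«' else '»') :: pvArec t (if (!b) then 1 else 2) := by
        cases b <;> simp [pvArec, hc, PySem.Int.mod]
      rw [hrec, ih (!b), h]
      simp [pvAlt]
    · have hsp : (c :: t).splitOn '"' = (c :: p) :: ps := by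
        simp only [List.splitOn, List.splitOnP_cons]
        have : (c == '"') = false := by simp [hc]
        simp only [this, Bool.false_eq_true, if_neg, not_false_iff]
        have := h
        simp only [List.splitOn] at this
        rw [this]; rfl
      rw [hsp]
      have hrec : pvArec (c :: t) (if b then 1 else 2)
          = c :: pvArec t (if b then 1 else 2) := by
        cases b <;> simp [pvArec, hc]
      rw [hrec, ih b, h]
      simp

-- ===== VERDICT (by name: the statement is the Claim_ definition above) =====
theorem fix_quotes_spec : Claim_equal_fix_quotes := by
  intro s _
  show fix_quotes s = fix_quotes_alt s
  unfold fix_quotes fix_quotes_alt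
  simp only [pvFoldA, pvFoldB, List.nil_append]
  have := pvMain s.toList true
  simp only [if_pos] at this
  rw [this]
  rfl
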